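-- pv_equiv track=rewrite | github.com/ForCodingTest/Programmers | day1/72410-신규아이디추천/wgwjh05169.py | solution
-- ===== SOURCE A (Python) =====
-- def solution(new_id):
--     answer = ''
--     usable = ('-', '_')
--     for char in new_id.lower():
--         if char.isalnum():
--             answer += char
--         elif char in usable:
--             answer += char
--         elif char == '.' and len(answer) > 0 and answer[-1] != '.':
--             answer += char
--
--     answer = answer.lstrip('.').rstrip('.')
--
--     if answer == '':
--         answer = 'a'
--
--     if len(answer) > 15:
--         answer = answer[:15].rstrip('.')
--     elif len(answer) < 3:
--         answer += answer[-1] * (3 - len(answer))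
--
--     return answer
-- ===== SOURCE B (Python) =====
-- def solution(new_id):
--     s = new_id.lower()
--     kept = [c for c in s if c.isalnum() or c in '_-.']
--     collapsed = [c for p, c in zip(',' + ''.join(kept), kept) if c != '.' or p != '.']
--     s = ''.join(collapsed).strip('.')
--     if not s:
--         s = 'a'
--     if len(s) > 15:
--         s = s[:15].rstrip('.')
--     elif len(s) < 3:
--         s = s + s[-1] * (3 - len(s))
--     return s
-- ===== Notes on version B (the rewrite author's own statement) =====
-- stated objective: idiomatic
-- what changed: A's single fused loop (filter plus inline dot-run dedup against the last appended character) is replaced by a multi-pass pipeline: lowercase, filter the allowed characters, collapse dot runs by zipping each character with its predecessor, strip boundary dots, then the length guards.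
import Mathlib
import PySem

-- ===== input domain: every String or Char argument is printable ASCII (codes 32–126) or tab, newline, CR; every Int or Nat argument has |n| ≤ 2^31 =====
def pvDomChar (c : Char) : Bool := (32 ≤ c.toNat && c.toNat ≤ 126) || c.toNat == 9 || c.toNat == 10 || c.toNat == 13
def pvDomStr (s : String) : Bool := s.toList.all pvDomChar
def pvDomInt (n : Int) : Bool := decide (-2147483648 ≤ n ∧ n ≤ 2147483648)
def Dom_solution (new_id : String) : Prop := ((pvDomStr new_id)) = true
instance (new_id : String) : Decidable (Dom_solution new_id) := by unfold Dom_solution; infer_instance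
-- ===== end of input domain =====

-- B rewrites A's single fused filter/dot-dedup loop as an idiomatic multi-pass pipeline
-- (lowercase, filter, collapse dot runs by zipping with the previous character, strip, guards).

-- exact: s.rstrip('.') — drop the trailing run of dots (both Pythons call it)
def pyRstripDot (s : List Char) : List Char := (s.reverse.dropWhile (· == '.')).reverse
-- exact: s.lstrip('.') — drop the leading run of dots
def pyLstripDot (s : List Char) : List Char := s.dropWhile (· == '.')

-- ===== PORT A =====
-- the for-loop of A: build `answer` character by character
def solutionLoopA (acc : List Char) : List Char → List Char
  | [] => acc
  | c :: t =>
    if PySem.Chars.isalnum c then solutionLoopA (acc ++ [c]) t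
    else if c = '-' ∨ c = '_' then solutionLoopA (acc ++ [c]) t
    else if c = '.' ∧ 0 < acc.length ∧ PySem.List.pyGet? acc (-1) ≠ some '.' then
      solutionLoopA (acc ++ [c]) t
    else solutionLoopA acc t

def solution (new_id : String) : String :=
  let a1 := solutionLoopA [] (PySem.Chars.lower new_id.toList)
  let a2 := pyRstripDot (pyLstripDot a1)
  let a3 := if a2 = [] then ['a'] else a2
  let a4 := if 15 < a3.length then pyRstripDot (PySem.List.slice a3 none (some 15))
            else if a3.length < 3 then a3 ++ List.replicate (3 - a3.length) (PySem.List.pyGetD a3 (-1) 'a')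
            else a3
  String.ofList a4

-- ===== PORT B =====
def solution_alt (new_id : String) : String :=
  let s := PySem.Chars.lower new_id.toList
  let kept := s.filter (fun c => PySem.Chars.isalnum c || c == '_' || c == '-' || c == '.')
  let collapsed := ((',' :: kept).zip kept).filterMap
      (fun pc => if pc.2 ≠ '.' ∨ pc.1 ≠ '.' then some pc.2 else none)
  let s2 := PySem.Chars.stripChars collapsed ['.']
  let s3 := if s2 = [] then ['a'] else s2
  let s4 := if 15 < s3.length then pyRstripDot (PySem.List.slice s3 none (some 15))
            else if s3.length < 3 then s3 ++ List.replicate (3 - s3.length) (PySem.List.pyGetD s3 (-1) 'a')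
            else s3
  String.ofList s4

-- ===== PRECONDITION & SPEC =====
def Spec_solution (new_id : String) (out : String) : Prop := out = solution_alt new_id
instance (new_id : String) (out : String) : Decidable (Spec_solution new_id out) := by unfold Spec_solution; infer_instance

-- ===== CLAIM (what is proved, stated in full; the proofs are below) =====
def Claim_equal_solution : Prop := ∀ (new_id : String), Dom_solution new_id → Spec_solution new_id (solution new_id)

-- ===== LEMMAS AND PROOFS =====

-- mathematical middle-men for the two loop shapes
def pvRun (b : Bool) : List Char → List Char
  | [] => []
  | c :: t =>
    if PySem.Chars.isalnum c then c :: pvRun true t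
    else if c = '-' ∨ c = '_' then c :: pvRun true t
    else if c = '.' then (if b then '.' :: pvRun false t else pvRun false t)
    else pvRun b t

def pvZc (p : Char) : List Char → List Char
  | [] => []
  | c :: t => if c ≠ '.' ∨ p ≠ '.' then c :: pvZc c t else pvZc c t

theorem loopA_cons (acc : List Char) (c : Char) (t : List Char) :
    solutionLoopA acc (c :: t) =
      if PySem.Chars.isalnum c then solutionLoopA (acc ++ [c]) t
      else if c = '-' ∨ c = '_' then solutionLoopA (acc ++ [c]) t
      else if c = '.' ∧ 0 < acc.length ∧ PySem.List.pyGet? acc (-1) ≠ some '.' then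
        solutionLoopA (acc ++ [c]) t
      else solutionLoopA acc t := rfl

theorem pvRun_cons (b : Bool) (c : Char) (t : List Char) :
    pvRun b (c :: t) =
      if PySem.Chars.isalnum c then c :: pvRun true t
      else if c = '-' ∨ c = '_' then c :: pvRun true t
      else if c = '.' then (if b then '.' :: pvRun false t else pvRun false t)
      else pvRun b t := rfl

theorem pvZc_cons (p c : Char) (t : List Char) :
    pvZc p (c :: t) = if c ≠ '.' ∨ p ≠ '.' then c :: pvZc c t else pvZc c t := rfl

theorem isalnum_ne_dot {c : Char} (h : PySem.Chars.isalnum c = true) : c ≠ '.' := by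
  intro he; subst he; exact absurd h (by decide)

theorem stripChars_eq (s : List Char) :
    PySem.Chars.stripChars s ['.'] = pyRstripDot (pyLstripDot s) := by
  simp only [PySem.Chars.stripChars, pyRstripDot, pyLstripDot]
  have hfun : (fun c => (['.'] : List Char).contains c) = (fun c => c == ('.' : Char)) := by
    funext c; by_cases h : c = '.' <;> simp [h]
  rw [hfun]

theorem loopA_eq_run (l : List Char) : ∀ (acc : List Char) (b : Bool),
    (b = true ↔ (acc ≠ [] ∧ acc.getLast? ≠ some '.')) →
    solutionLoopA acc l = acc ++ pvRun b l := by
  induction l with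
  | nil => intro acc b _; simp [solutionLoopA, pvRun]
  | cons c t ih =>
    intro acc b hb
    rw [loopA_cons, pvRun_cons]
    by_cases h1 : PySem.Chars.isalnum c
    · rw [if_pos h1, if_pos h1, ih (acc ++ [c]) true (by simp [isalnum_ne_dot h1])]; simp
    · rw [if_neg h1, if_neg h1]
      by_cases h2 : c = '-' ∨ c = '_'
      · have hc : c ≠ '.' := by rcases h2 with h | h <;> subst h <;> decide
        rw [if_pos h2, if_pos h2, ih (acc ++ [c]) true (by simp [hc])]; simp
      · rw [if_neg h2, if_neg h2]
        by_cases h3 : c = '.'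
        · subst h3
          rw [if_pos rfl]
          by_cases h4 : acc ≠ [] ∧ acc.getLast? ≠ some '.'
          · have hlen : (0 : ℕ) < acc.length := by
              cases acc with
              | nil => exact absurd rfl h4.1
              | cons a l => simp
            rw [hb.mpr h4, if_pos ⟨rfl, hlen, by
              rw [PySem.List.pyGet?_neg_one]; exact h4.2⟩]
            rw [ih (acc ++ ['.']) false (by simp)]
            simp
          · have hb' : b = false := by
              cases b with
              | false => rfl
              | true => exact absurd (hb.mp rfl) h4
            rw [hb', if_neg (by
              rintro ⟨-, hlenp, hlast⟩
              apply h4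
              refine ⟨?_, by rw [PySem.List.pyGet?_neg_one] at hlast; exact hlast⟩
              intro hnil; subst hnil; simp at hlenp)]
            rw [ih acc false (by
              constructor
              · intro h; exact absurd h (by simp)
              · intro h; exact absurd h h4)]
            simp
        · rw [if_neg (fun hcon => h3 hcon.1), if_neg h3]
          exact ih acc b hb

def pvFilterB (l : List Char) : List Char :=
  l.filter (fun c => PySem.Chars.isalnum c || c == '_' || c == '-' || c == '.')

theorem zip_filterMap_eq_zc (l : List Char) : ∀ (p : Char),
    ((p :: l).zip l).filterMap (fun pc => if pc.2 ≠ '.' ∨ pc.1 ≠ '.' then some pc.2 else none)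
      = pvZc p l := by
  induction l with
  | nil => intro p; simp [pvZc]
  | cons c t ih =>
    intro p
    simp only [List.zip_cons_cons, List.filterMap_cons, pvZc_cons]
    by_cases h : c ≠ '.' ∨ p ≠ '.'
    · rw [if_pos h, if_pos h]; simpa using ih c
    · rw [if_neg h, if_neg h]; simpa using ih c

theorem run_eq_zc_filter (l : List Char) : ∀ (p : Char),
    pvRun (decide (p ≠ '.')) l = pvZc p (pvFilterB l) := by
  induction l with
  | nil => intro p; simp [pvRun, pvFilterB, pvZc]
  | cons c t ih =>
    intro p
    rw [pvRun_cons]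
    simp only [pvFilterB, List.filter_cons]
    by_cases h1 : PySem.Chars.isalnum c
    · have hc : c ≠ '.' := isalnum_ne_dot h1
      rw [if_pos h1, if_pos (by simp [h1] : (PySem.Chars.isalnum c || c == '_' || c == '-' || c == '.') = true)]
      rw [pvZc_cons, if_pos (Or.inl hc)]
      have := ih c
      rw [decide_eq_true hc] at this
      rw [this, pvFilterB]
    · rw [if_neg h1]
      by_cases h2 : c = '-' ∨ c = '_'
      · have hc : c ≠ '.' := by rcases h2 with h | h <;> subst h <;> decide
        have hm : (PySem.Chars.isalnum c || c == '_' || c == '-' || c == '.') = true := by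
          rcases h2 with h | h <;> subst h <;> decide
        rw [if_pos h2, if_pos hm, pvZc_cons, if_pos (Or.inl hc)]
        have := ih c
        rw [decide_eq_true hc] at this
        rw [this, pvFilterB]
      · rw [if_neg h2]
        by_cases h3 : c = '.'
        · subst h3
          rw [if_pos rfl, if_pos (by decide : (PySem.Chars.isalnum '.' || '.' == '_' || '.' == '-' || '.' == '.') = true)]
          rw [pvZc_cons]
          have hrec := ih '.'
          rw [decide_eq_false (by simp : ¬ ('.' : Char) ≠ '.')] at hrec
          rw [pvFilterB] at hrec
          by_cases hp : p ≠ '.'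
          · rw [decide_eq_true hp, if_pos (Or.inr hp), if_pos rfl, hrec]
          · have hp' : p = '.' := not_not.mp hp
            rw [decide_eq_false hp, if_neg (by simp), if_neg (show ¬('.' ≠ '.' ∨ p ≠ '.') by rw [hp']; simp), hrec]
        · have hm : (PySem.Chars.isalnum c || c == '_' || c == '-' || c == '.') = false := by
            simp only [Bool.or_eq_false_iff, beq_eq_false_iff_ne]
            refine ⟨⟨⟨by simpa using h1, by tauto⟩, by tauto⟩, h3⟩
          rw [if_neg h3, hm, if_neg (by simp)]
          have := ih p
          rw [pvFilterB] at this
          exact this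

-- pvZc '.' produces no leading dot run
theorem dropWhile_zc_dot (l : List Char) :
    (pvZc '.' l).dropWhile (· == '.') = pvZc '.' l := by
  induction l with
  | nil => simp [pvZc]
  | cons c t ih =>
    by_cases h : c = '.'
    · subst h; rw [pvZc_cons, if_neg (by simp)]; exact ih
    · rw [pvZc_cons, if_pos (Or.inl h), List.dropWhile_cons, if_neg (by simpa using h)]

theorem dropWhile_zc (l : List Char) : ∀ (p : Char), p ≠ '.' →
    (pvZc p l).dropWhile (· == '.') = pvZc '.' l := by
  induction l with
  | nil => intro p _; simp [pvZc]
  | cons c t ih =>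
    intro p hp
    by_cases h : c = '.'
    · subst h
      rw [pvZc_cons, if_pos (Or.inr hp), List.dropWhile_cons, if_pos (by simp),
        pvZc_cons, if_neg (by simp)]
      exact dropWhile_zc_dot t
    · rw [pvZc_cons, if_pos (Or.inl h), pvZc_cons, if_pos (Or.inl h),
        List.dropWhile_cons, if_neg (by simpa using h)]

-- ===== VERDICT (by name: the statement is the Claim_ definition above) =====
theorem solution_spec : Claim_equal_solution := by
  intro new_id _
  unfold Spec_solution
  simp only [solution, solution_alt]
  have hA : solutionLoopA [] (PySem.Chars.lower new_id.toList)
      = pvRun false (PySem.Chars.lower new_id.toList) := by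
    simpa using loopA_eq_run (PySem.Chars.lower new_id.toList) [] false (by simp)
  have hB := zip_filterMap_eq_zc
      ((PySem.Chars.lower new_id.toList).filter
        (fun c => PySem.Chars.isalnum c || c == '_' || c == '-' || c == '.')) ','
  have hrunA : pvRun false (PySem.Chars.lower new_id.toList)
      = pvZc '.' (pvFilterB (PySem.Chars.lower new_id.toList)) := by
    have := run_eq_zc_filter (PySem.Chars.lower new_id.toList) '.'
    simpa using this
  have hstrip : pyRstripDot (pyLstripDot (pvZc '.' (pvFilterB (PySem.Chars.lower new_id.toList))))
      = PySem.Chars.stripChars (pvZc ',' (pvFilterB (PySem.Chars.lower new_id.toList))) ['.'] := by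
    rw [stripChars_eq]
    unfold pyRstripDot pyLstripDot
    rw [dropWhile_zc_dot, dropWhile_zc _ ',' (by decide)]
  rw [hA, hrunA]
  rw [show (List.filter (fun c => PySem.Chars.isalnum c || c == '_' || c == '-' || c == '.')
        (PySem.Chars.lower new_id.toList))
      = pvFilterB (PySem.Chars.lower new_id.toList) from rfl] at hB ⊢
  rw [hB, hstrip]
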